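-- pv_equiv track=rewrite | github.com/krzysztof-turowski/programming-contests | google-code-jam/2011-round-2/expensive_dinner.py | logarithm
-- ===== SOURCE A (Python) =====
-- def logarithm(N, b):
--     if N < b:
--         return 0, 1
--     if N < b * b:
--         return 1, b
--     p, v = logarithm(N, b * b)
--     if N < v * b:
--         return 2 * p, v
--     return 2 * p + 1, v * b
-- ===== SOURCE B (Python) =====
-- def logarithm(N, b):
--     p, v = 0, 1
--     while v * b <= N:
--         v *= b
--         p += 1
--     return p, v
-- ===== Notes on version B (the rewrite author's own statement) =====
-- stated objective: simpler
-- what changed: Replaces the recursion on b*b (repeated squaring with exponent reconstruction) by a single iterative loop that multiplies an accumulator by b and counts the steps.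
import Mathlib
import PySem

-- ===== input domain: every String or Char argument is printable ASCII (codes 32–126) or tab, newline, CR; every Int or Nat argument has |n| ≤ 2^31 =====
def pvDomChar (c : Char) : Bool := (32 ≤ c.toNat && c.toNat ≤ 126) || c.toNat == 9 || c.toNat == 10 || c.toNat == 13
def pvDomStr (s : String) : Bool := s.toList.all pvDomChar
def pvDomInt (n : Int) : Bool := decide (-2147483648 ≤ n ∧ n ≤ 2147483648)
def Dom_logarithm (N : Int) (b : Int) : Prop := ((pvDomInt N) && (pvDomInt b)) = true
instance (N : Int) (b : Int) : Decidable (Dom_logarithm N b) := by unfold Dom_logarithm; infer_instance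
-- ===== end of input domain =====

-- B replaces A's recursion on b*b by a plain iterative accumulator loop (simpler, not faster);
-- equivalence is about the returned pair on all inputs where the Python A terminates.

-- ===== PORT A =====
-- A's recursion `logarithm(N, b*b)` is not structurally decreasing; the fuel 64 is a pure
-- termination guard: within Dom_ and Pre_ the recursion depth is < 64, so fuel never runs out.
def logAuxA : Nat → Int → Int → Int × Int
  | 0, _, _ => (0, 1)
  | fuel+1, N, b =>
    if N < b then (0, 1)
    else if N < b * b then (1, b)
    else
      let pv := logAuxA fuel N (b * b)
      if N < pv.2 * b then (2 * pv.1, pv.2) else (2 * pv.1 + 1, pv.2 * b)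

def logarithm (N : Int) (b : Int) : Int × Int := logAuxA 64 N b

-- ===== PORT B =====
-- B's `while v*b <= N` loop; fuel 128 is a pure termination guard, never exhausted inside Pre_.
def logAuxB (N b : Int) : Nat → Int → Int → Int × Int
  | 0, p, v => (p, v)
  | fuel+1, p, v => if v * b ≤ N then logAuxB N b fuel (p + 1) (v * b) else (p, v)

def logarithm_alt (N : Int) (b : Int) : Int × Int := logAuxB N b 128 0 1

-- ===== PRECONDITION & SPEC =====
-- Pre_ is exactly the set of inputs on which the Python A terminates (returns): for |b| ≥ 2 the
-- recursion always bottoms out, and for b ∈ {-1,0,1} only the listed small-N cases return;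
-- everywhere else A raises RecursionError (and B loops forever), so nothing is claimed there.
def Pre_logarithm (N : Int) (b : Int) : Prop :=
  2 ≤ b ∨ b ≤ -2 ∨ (b = -1 ∧ N ≤ 0) ∨ (b = 0 ∧ N < 0) ∨ (b = 1 ∧ N ≤ 0)
instance (N : Int) (b : Int) : Decidable (Pre_logarithm N b) := by unfold Pre_logarithm; infer_instance
def pvWitness_logarithm : Int × Int := (100, 3)

def Spec_logarithm (N : Int) (b : Int) (out : Int × Int) : Prop := out = logarithm_alt N b
instance (N : Int) (b : Int) (out : Int × Int) : Decidable (Spec_logarithm N b out) := by unfold Spec_logarithm; infer_instance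

-- ===== CLAIM (what is proved, stated in full; the proofs are below) =====
def Claim_equal_logarithm : Prop := ∀ (N : Int) (b : Int), Dom_logarithm N b → Pre_logarithm N b → Spec_logarithm N b (logarithm N b)

-- ===== LEMMAS AND PROOFS =====

theorem logAuxA_step (fuel : Nat) (N b : Int) :
    logAuxA (fuel+1) N b =
      if N < b then (0, 1)
      else if N < b * b then (1, b)
      else
        let pv := logAuxA fuel N (b * b)
        if N < pv.2 * b then (2 * pv.1, pv.2) else (2 * pv.1 + 1, pv.2 * b) := rfl

theorem logAuxB_step (N b : Int) (fuel : Nat) (p v : Int) :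
    logAuxB N b (fuel+1) p v = if v * b ≤ N then logAuxB N b fuel (p + 1) (v * b) else (p, v) := rfl

-- uniqueness of the floor logarithm exponent for base a ≥ 2
theorem logUnique {a N : Int} (ha : 2 ≤ a) {k j : Nat}
    (hk1 : a ^ k ≤ N) (hk2 : N < a ^ (k+1)) (hj1 : a ^ j ≤ N) (hj2 : N < a ^ (j+1)) : k = j := by
  have h1 : (1:Int) ≤ a := by omega
  rcases lt_trichotomy k j with h | h | h
  · exfalso
    have : a ^ (k+1) ≤ a ^ j := pow_le_pow_right₀ h1 (by omega)
    omega
  · exact h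
  · exfalso
    have : a ^ (j+1) ≤ a ^ k := pow_le_pow_right₀ h1 (by omega)
    omega

theorem A_pos : ∀ (fuel : Nat) (N b : Int), 2 ≤ b → b ≤ N → N < b ^ (2 ^ fuel) →
    ∃ k : Nat, logAuxA fuel N b = ((k : Int), b ^ k) ∧ b ^ k ≤ N ∧ N < b ^ (k+1) := by
  intro fuel
  induction fuel with
  | zero => intro N b hb hbN hN; simp at hN; omega
  | succ f ih =>
    intro N b hb hbN hN
    rw [logAuxA_step]
    rw [if_neg (by omega)]
    by_cases h2 : N < b * b
    · rw [if_pos h2]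
      exact ⟨1, by norm_num, by simpa using hbN, by have : b ^ 2 = b * b := sq b; simpa [this] using h2⟩
    · rw [if_neg h2]
      have hbb : (2:Int) ≤ b * b := by nlinarith
      have hsq : ∀ m : Nat, (b * b) ^ m = b ^ (2 * m) := by
        intro m; rw [two_mul, pow_add]; rw [mul_pow]
      obtain ⟨k, hk, hk1, hk2⟩ := ih N (b * b) hbb (by omega)
        (by rw [hsq]; rw [show 2 * 2 ^ f = 2 ^ (f+1) by ring]; exact hN)
      rw [hk]
      simp only
      rw [hsq] at hk1 hk2
      by_cases h3 : N < (b * b) ^ k * b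
      · rw [if_pos h3]
        refine ⟨2 * k, by push_cast; ring_nf, hk1, ?_⟩
        have : (b*b)^k * b = b ^ (2*k+1) := by rw [hsq, pow_succ]
        rw [← this]; exact h3
      · rw [if_neg h3]
        refine ⟨2 * k + 1, by push_cast; ring_nf, ?_, ?_⟩
        · have : (b*b)^k * b = b ^ (2*k+1) := by rw [hsq, pow_succ]
          rw [← this]; omega
        · rw [show 2*k+1+1 = 2*(k+1) from by ring]
          exact hk2

theorem B_pos : ∀ (fuel : Nat) (N b : Int) (k : Nat), 2 ≤ b → b ^ k ≤ N → N < b ^ (k + fuel) →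
    ∃ j : Nat, logAuxB N b fuel (k : Int) (b ^ k) = ((j : Int), b ^ j) ∧ b ^ j ≤ N ∧ N < b ^ (j+1) := by
  intro fuel
  induction fuel with
  | zero => intro N b k hb h1 h2; simp at h2; omega
  | succ f ih =>
    intro N b k hb h1 h2
    rw [logAuxB_step]
    by_cases h : b ^ k * b ≤ N
    · rw [if_pos h]
      have hs : b ^ k * b = b ^ (k+1) := (pow_succ b k).symm
      have := ih N b (k+1) hb (by rw [← hs]; exact h) (by rw [show k+1+f = k+(f+1) by ring]; exact h2)
      rw [hs]
      push_cast at this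
      exact this
    · rw [if_neg h]
      exact ⟨k, rfl, h1, by rw [pow_succ]; omega⟩

theorem A_neg (fuel : Nat) (N b : Int) (hb : b ≤ -2) (hN : b * b ≤ N) (hN2 : N < (b*b) ^ (2 ^ fuel)) :
    ∃ k : Nat, logAuxA (fuel+1) N b = (2*(k:Int)+1, (b*b) ^ k * b) ∧ (b*b) ^ k ≤ N ∧ N < (b*b) ^ (k+1) := by
  have hbb : (2:Int) ≤ b * b := by nlinarith
  rw [logAuxA_step]
  rw [if_neg (by omega), if_neg (by omega)]
  obtain ⟨k, hk, hk1, hk2⟩ := A_pos fuel N (b*b) hbb hN hN2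
  rw [hk]
  simp only
  have hvpos : (0:Int) < (b*b) ^ k := pow_pos (by nlinarith) k
  have hvb : (b*b) ^ k * b < 0 := mul_neg_of_pos_of_neg hvpos (by omega)
  rw [if_neg (by omega)]
  exact ⟨k, rfl, hk1, hk2⟩

theorem B_neg : ∀ (m : Nat) (N b : Int) (k : Nat), b ≤ -2 → (b*b) ^ k ≤ N → N < (b*b) ^ (k + m) →
    ∃ j : Nat, logAuxB N b (2*m) (2*(k:Int)) ((b*b) ^ k) = (2*(j:Int)+1, (b*b) ^ j * b) ∧
      (b*b) ^ j ≤ N ∧ N < (b*b) ^ (j+1) := by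
  intro m
  induction m with
  | zero => intro N b k hb h1 h2; simp at h2; omega
  | succ f ih =>
    intro N b k hb h1 h2
    have hbbpos : (0:Int) < b * b := by nlinarith
    have hvpos : (0:Int) < (b*b) ^ k := pow_pos hbbpos k
    have hvb : (b*b) ^ k * b < 0 := mul_neg_of_pos_of_neg hvpos (by omega)
    have hstep : 2 * (f+1) = (2*f+1)+1 := by ring
    rw [hstep, logAuxB_step, if_pos (by omega)]
    rw [logAuxB_step]
    have hmul : (b*b) ^ k * b * b = (b*b) ^ (k+1) := by rw [pow_succ]; ring
    by_cases h : (b*b) ^ k * b * b ≤ N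
    · rw [if_pos h]
      rw [hmul]
      have := ih N b (k+1) hb (by rw [← hmul]; exact h) (by rw [show k+1+f = k+(f+1) by ring]; exact h2)
      push_cast at this
      rw [show 2*(k:Int)+1+1 = 2*(k:Int)+2 from by ring]
      convert this using 3
    · rw [if_neg h]
      exact ⟨k, rfl, h1, by rw [← hmul]; omega⟩

theorem pow_big {a : Int} (ha : 2 ≤ a) (m : Nat) (hm : 32 ≤ m) : (2147483648:Int) < a ^ m := by
  have h1 : (2:Int) ^ 32 ≤ a ^ 32 := pow_le_pow_left₀ (by norm_num) ha 32
  have h2 : a ^ 32 ≤ a ^ m := pow_le_pow_right₀ (by omega) hm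
  have : (2147483648:Int) < 2 ^ 32 := by norm_num
  omega

-- ===== VERDICT (by name: the statement is the Claim_ definition above) =====
theorem logarithm_spec : Claim_equal_logarithm := by
  intro N b hDom hPre
  have hN : N ≤ 2147483648 := by
    unfold Dom_logarithm at hDom; simp [pvDomInt] at hDom; omega
  unfold Spec_logarithm logarithm logarithm_alt
  rcases hPre with hb | hb | ⟨hb, hN0⟩ | ⟨hb, hN0⟩ | ⟨hb, hN0⟩
  · -- 2 ≤ b
    by_cases hNb : N < b
    · rw [show (64:Nat) = 63+1 from rfl, logAuxA_step, if_pos hNb]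
      rw [show (128:Nat) = 127+1 from rfl, logAuxB_step, if_neg (by omega)]
    · obtain ⟨k, hkA, hk1, hk2⟩ := A_pos 64 N b hb (by omega)
        (lt_of_le_of_lt hN (pow_big hb _ (by norm_num)))
      obtain ⟨j, hjB, hj1, hj2⟩ := B_pos 128 N b 0 hb (by simpa using by omega)
        (by simpa using lt_of_le_of_lt hN (pow_big hb 128 (by norm_num)))
      have : k = j := logUnique hb hk1 hk2 hj1 hj2
      subst this
      simp only [Nat.cast_zero, pow_zero] at hjB
      rw [hkA, hjB]
  · -- b ≤ -2
    by_cases hNb : N < b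
    · rw [show (64:Nat) = 63+1 from rfl, logAuxA_step, if_pos hNb]
      rw [show (128:Nat) = 127+1 from rfl, logAuxB_step, if_neg (by omega)]
    · by_cases hNbb : N < b * b
      · rw [show (64:Nat) = 63+1 from rfl, logAuxA_step, if_neg (by omega), if_pos hNbb]
        rw [show (128:Nat) = 126+1+1 from rfl, logAuxB_step, if_pos (by omega)]
        rw [logAuxB_step, if_neg (by simpa using by omega)]
        norm_num
      · have hbb : (2:Int) ≤ b * b := by nlinarith
        obtain ⟨k, hkA, hk1, hk2⟩ := A_neg 63 N b hb (by omega)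
          (lt_of_le_of_lt hN (pow_big hbb _ (by norm_num)))
        obtain ⟨j, hjB, hj1, hj2⟩ := B_neg 64 N b 0 hb (by simpa using by omega)
          (by simpa using lt_of_le_of_lt hN (pow_big hbb 64 (by norm_num)))
        have : k = j := logUnique hbb hk1 hk2 hj1 hj2
        subst this
        simp only [Nat.cast_zero, mul_zero, pow_zero] at hjB
        rw [show (64:Nat) = 63+1 from rfl, hkA, show (128:Nat) = 2*64 from rfl, hjB]
  · -- b = -1, N ≤ 0
    subst hb
    by_cases hNb : N < -1
    · rw [show (64:Nat) = 63+1 from rfl, logAuxA_step, if_pos hNb]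
      rw [show (128:Nat) = 127+1 from rfl, logAuxB_step, if_neg (by omega)]
    · rw [show (64:Nat) = 63+1 from rfl, logAuxA_step, if_neg (by omega), if_pos (by norm_num; omega)]
      rw [show (128:Nat) = 126+1+1 from rfl, logAuxB_step, if_pos (by omega)]
      rw [logAuxB_step, if_neg (by norm_num; omega)]
      norm_num
  · -- b = 0, N < 0
    subst hb
    rw [show (64:Nat) = 63+1 from rfl, logAuxA_step, if_pos (by omega)]
    rw [show (128:Nat) = 127+1 from rfl, logAuxB_step, if_neg (by omega)]
  · -- b = 1, N ≤ 0
    subst hb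
    rw [show (64:Nat) = 63+1 from rfl, logAuxA_step, if_pos (by omega)]
    rw [show (128:Nat) = 127+1 from rfl, logAuxB_step, if_neg (by omega)]
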